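-- pv_equiv track=rewrite | github.com/petermdtran246/Banking-Application | CoinCollector.py | parseChange
-- ===== SOURCE A (Python) =====
-- def parseChange(coins):
--     """
--     Calculate the amount it represents in cents as a 'long' and return it.
--
--     :parameter:
--     -------------------
--         coins = A string representing the coins (P, N D, Q, H, W)
--
--     :return:
--     --------------------
--         The total value of the coins in cents
--     """
--
--     total_value = 0
--     coin_value = {
--         'P': 1, # Penny
--         'N': 5, # Nickel
--         'D': 10, # Cents
--         'Q': 25, # Quarters
--         'H': 50, # Half-dollar
--         'W': 100, # Whole dollar
--     }
--
--     for coin in coins: # Convert coin string to uppercase for case-insensitive matching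
--         if coin in coin_value:
--             total_value += coin_value[coin]
--     return total_value
-- ===== SOURCE B (Python) =====
-- def parseChange(coins):
--     # Count-first, weight-second: tally every character, then weight the six coin types.
--     counts = {}
--     for ch in coins:
--         counts[ch] = counts.get(ch, 0) + 1
--     total = 0
--     for c, v in (('P', 1), ('N', 5), ('D', 10), ('Q', 25), ('H', 50), ('W', 100)):
--         total += counts.get(c, 0) * v
--     return total
-- ===== Notes on version B (the rewrite author's own statement) =====
-- stated objective: alternative
-- what changed: Replaced the per-character accumulate-if-coin loop with a two-phase decomposition: build a character frequency tally first, then compute the total by weighting the six coin types from the value table against their counts.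
import Mathlib
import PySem

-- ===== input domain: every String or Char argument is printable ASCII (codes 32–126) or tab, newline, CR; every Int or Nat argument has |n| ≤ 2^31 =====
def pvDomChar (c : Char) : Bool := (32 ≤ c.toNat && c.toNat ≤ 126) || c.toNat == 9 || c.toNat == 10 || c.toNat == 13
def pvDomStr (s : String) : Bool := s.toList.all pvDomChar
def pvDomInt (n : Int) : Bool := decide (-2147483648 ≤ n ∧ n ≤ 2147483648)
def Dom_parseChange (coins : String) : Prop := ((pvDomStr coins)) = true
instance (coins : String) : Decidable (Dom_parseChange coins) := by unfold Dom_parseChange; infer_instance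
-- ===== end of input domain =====

-- B replaces A's per-character accumulate-if-coin loop with a count-first, weight-the-table-second
-- decomposition (same O(n) cost; objective: alternative).


-- ===== PORT A =====
-- A: literal dict of coin values, then one loop: if coin in dict, add its value.
def pvCoinValue : PySem.Dict Char Int :=
  PySem.Dict.ofList [('P', 1), ('N', 5), ('D', 10), ('Q', 25), ('H', 50), ('W', 100)]

def parseChange (coins : String) : Int :=
  coins.toList.foldl
    (fun total_value coin =>
      if pvCoinValue.contains coin then total_value + pvCoinValue.getD coin 0
      else total_value)
    0

-- ===== PORT B =====
-- B: first loop tallies every character into a dict; second loop weights the six coin types.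
def parseChange_alt (coins : String) : Int :=
  let counts : PySem.Dict Char Int :=
    coins.toList.foldl (fun d ch => d.insert ch (d.getD ch 0 + 1)) PySem.Dict.empty
  ([('P', (1 : Int)), ('N', 5), ('D', 10), ('Q', 25), ('H', 50), ('W', 100)]).foldl
    (fun total cv => total + counts.getD cv.1 0 * cv.2) 0

-- ===== PRECONDITION & SPEC =====
def Spec_parseChange (coins : String) (out : Int) : Prop := out = parseChange_alt coins
instance (coins : String) (out : Int) : Decidable (Spec_parseChange coins out) := by unfold Spec_parseChange; infer_instance

-- ===== CLAIM (what is proved, stated in full; the proofs are below) =====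
def Claim_equal_parseChange : Prop := ∀ (coins : String), Dom_parseChange coins → Spec_parseChange coins (parseChange coins)

-- ===== LEMMAS AND PROOFS =====

-- per-character value that A adds (0 for non-coins)
def pvF (c : Char) : Int :=
  if c = 'P' then 1 else if c = 'N' then 5 else if c = 'D' then 10
  else if c = 'Q' then 25 else if c = 'H' then 50 else if c = 'W' then 100 else 0

theorem pvStepA (a : Int) (c : Char) :
    (if pvCoinValue.contains c then a + pvCoinValue.getD c 0 else a) = a + pvF c := by
  by_cases h1 : c = 'P'
  · subst h1
    simp [pvF, (by decide : pvCoinValue.contains 'P' = true),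
      (by decide : pvCoinValue.getD 'P' 0 = 1)]
  by_cases h2 : c = 'N'
  · subst h2
    simp [pvF, h1, (by decide : pvCoinValue.contains 'N' = true),
      (by decide : pvCoinValue.getD 'N' 0 = 5)]
  by_cases h3 : c = 'D'
  · subst h3
    simp [pvF, h1, h2, (by decide : pvCoinValue.contains 'D' = true),
      (by decide : pvCoinValue.getD 'D' 0 = 10)]
  by_cases h4 : c = 'Q'
  · subst h4
    simp [pvF, h1, h2, h3, (by decide : pvCoinValue.contains 'Q' = true),
      (by decide : pvCoinValue.getD 'Q' 0 = 25)]
  by_cases h5 : c = 'H'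
  · subst h5
    simp [pvF, h1, h2, h3, h4, (by decide : pvCoinValue.contains 'H' = true),
      (by decide : pvCoinValue.getD 'H' 0 = 50)]
  by_cases h6 : c = 'W'
  · subst h6
    simp [pvF, h1, h2, h3, h4, h5, (by decide : pvCoinValue.contains 'W' = true),
      (by decide : pvCoinValue.getD 'W' 0 = 100)]
  · rw [PySem.Dict.contains_eq_decide_mem_keys,
      (by decide : pvCoinValue.keys = ['P', 'N', 'D', 'Q', 'H', 'W'])]
    simp [pvF, h1, h2, h3, h4, h5, h6]

-- A's loop is the fold of pvF
theorem pvA_eq (l : List Char) (a : Int) :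
    l.foldl (fun t c => if pvCoinValue.contains c then t + pvCoinValue.getD c 0 else t) a
      = l.foldl (fun t c => t + pvF c) a := by
  induction l generalizing a with
  | nil => rfl
  | cons c l ih => rw [List.foldl_cons, List.foldl_cons, pvStepA, ih]

-- the fold of pvF is the weighted character count
theorem pvF_sum (l : List Char) (a : Int) :
    l.foldl (fun t c => t + pvF c) a
      = a + (l.count 'P' : Int) * 1 + (l.count 'N' : Int) * 5 + (l.count 'D' : Int) * 10
          + (l.count 'Q' : Int) * 25 + (l.count 'H' : Int) * 50 + (l.count 'W' : Int) * 100 := by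
  induction l generalizing a with
  | nil => simp
  | cons c l ih =>
    rw [List.foldl_cons, ih]
    simp only [List.count_cons]
    clear ih
    by_cases h1 : c = 'P' <;> by_cases h2 : c = 'N' <;> by_cases h3 : c = 'D' <;>
      by_cases h4 : c = 'Q' <;> by_cases h5 : c = 'H' <;> by_cases h6 : c = 'W' <;>
      simp_all [pvF] <;> push_cast <;> ring

-- ===== VERDICT (by name: the statement is the Claim_ definition above) =====
theorem parseChange_spec : Claim_equal_parseChange := by
  intro coins _
  unfold Spec_parseChange parseChange parseChange_alt
  simp only [List.foldl_cons, List.foldl_nil,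
    PySem.Dict.foldl_insert_getD_add_one_eq_counter, PySem.Dict.getD_counter]
  rw [pvA_eq, pvF_sum]
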